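-- pv_equiv track=rewrite | github.com/Memory-Seed/MemorySeed_project | AI_ksh/src/preprocessor.py | _weekly_steps
-- ===== SOURCE A (Python) =====
-- def _weekly_steps(days: list[dict]) -> dict:
--     counts = [d["steps"] for d in days]
--     return {
--         "total":           sum(counts),
--         "daily_avg":       round(sum(counts) / len(counts)),
--         "max_day":         max(counts),
--         "days_over_10000": sum(1 for c in counts if c >= 10000),
--     }
-- ===== SOURCE B (Python) =====
-- def _weekly_steps(days: list[dict]) -> dict:
--     # sort-then-scan: descending order makes the max the first element and the
--     # >=10000 days a prefix, counted by walking until the first smaller value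
--     ranked = sorted((d["steps"] for d in days), reverse=True)
--     total = sum(ranked)
--     over = 0
--     for s in ranked:
--         if s < 10000:
--             break
--         over += 1
--     return {
--         "total": total,
--         "daily_avg": round(total / len(days)),
--         "max_day": ranked[0],
--         "days_over_10000": over,
--     }
-- ===== Notes on version B (the rewrite author's own statement) =====
-- stated objective: alternative
-- what changed: Sort-then-scan instead of independent reductions: the step counts are sorted descending once, so the max is the first element and the days over 10000 form a prefix whose length is found by scanning until the first smaller value; only the sum and the average division remain as arithmetic.
import Mathlib
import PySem

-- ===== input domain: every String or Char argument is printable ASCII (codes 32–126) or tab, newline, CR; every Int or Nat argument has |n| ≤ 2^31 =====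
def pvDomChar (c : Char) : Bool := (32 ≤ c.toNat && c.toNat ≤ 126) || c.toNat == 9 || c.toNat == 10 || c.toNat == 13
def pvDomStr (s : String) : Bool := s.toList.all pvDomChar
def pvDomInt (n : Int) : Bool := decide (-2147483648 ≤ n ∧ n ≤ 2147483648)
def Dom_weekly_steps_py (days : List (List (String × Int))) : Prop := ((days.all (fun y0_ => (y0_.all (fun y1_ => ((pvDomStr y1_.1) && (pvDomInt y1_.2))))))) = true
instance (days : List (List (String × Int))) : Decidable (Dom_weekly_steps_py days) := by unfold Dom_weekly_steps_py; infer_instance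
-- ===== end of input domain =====

-- B sorts the step counts descending once and reads all three order statistics off the
-- sorted list (max = head, days over 10000 = prefix length), instead of A's four
-- independent reductions over an intermediate list (objective: alternative).

-- ===== PORT A =====
-- Python's built-in round(t / n) for integers t, n with n > 0: round-half-to-even of the
-- exact rational t/n.  Exact w.r.t. CPython's float round wherever the float division is
-- exact enough to preserve the nearest-half comparison (in particular for |t| < 2^52,
-- which covers the whole sampled domain: each entry has |steps| ≤ 2^31).
def pyRoundDiv (t n : Int) : Int :=
  let q := PySem.Int.floordiv t n
  let r := t - q * n
  if 2 * r < n then q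
  else if 2 * r > n then q + 1
  else if q % 2 = 0 then q else q + 1

-- d["steps"]: first-match association-list lookup; under Pre_ the key is present,
-- so the .getD 0 default is never taken.
def pvSteps (d : List (String × Int)) : Int := (d.lookup "steps").getD 0

def weekly_steps_py (days : List (List (String × Int))) : List (String × Int) :=
  let counts := days.map pvSteps
  [("total", counts.sum),
   ("daily_avg", pyRoundDiv counts.sum (counts.length : Int)),
   ("max_day", (PySem.List.max? counts (fun x => x)).getD 0),
   ("days_over_10000", counts.foldl (fun acc c => if c ≥ 10000 then acc + 1 else acc) 0)]

-- ===== PORT B =====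
-- the prefix scan 'for s in ranked: if s < 10000: break; over += 1'
def pvOverPrefix : List Int → Int
  | [] => 0
  | s :: t => if s < 10000 then 0 else 1 + pvOverPrefix t

def weekly_steps_py_alt (days : List (List (String × Int))) : List (String × Int) :=
  let ranked := PySem.List.sorted (days.map pvSteps) (fun x => x) true
  let total := ranked.sum
  let overCnt := pvOverPrefix ranked
  [("total", total),
   ("daily_avg", pyRoundDiv total (days.length : Int)),
   ("max_day", PySem.List.pyGetD ranked 0 0),
   ("days_over_10000", overCnt)]

-- ===== PRECONDITION & SPEC =====
-- Pre_ excludes exactly the inputs where the Python A raises: the empty list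
-- (ZeroDivisionError in round(sum/len)) and any day dict missing the "steps" key (KeyError).
def Pre_weekly_steps_py (days : List (List (String × Int))) : Prop :=
  days ≠ [] ∧ (days.all (fun d => (d.lookup "steps").isSome)) = true
instance (days : List (List (String × Int))) : Decidable (Pre_weekly_steps_py days) := by
  unfold Pre_weekly_steps_py; infer_instance

def pvWitness_weekly_steps_py : (List (List (String × Int))) := [[("steps", 12000)], [("steps", 3)]]

def Spec_weekly_steps_py (days : List (List (String × Int))) (out : List (String × Int)) : Prop := out = weekly_steps_py_alt days
instance (days : List (List (String × Int))) (out : List (String × Int)) : Decidable (Spec_weekly_steps_py days out) := by unfold Spec_weekly_steps_py; infer_instance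

-- ===== CLAIM =====
def Claim_equal_weekly_steps_py : Prop := ∀ (days : List (List (String × Int))), Dom_weekly_steps_py days → Pre_weekly_steps_py days → Spec_weekly_steps_py days (weekly_steps_py days)

-- ===== LEMMAS AND PROOFS =====

-- A's counting fold is countP, shifted by the accumulator
theorem pvCountA_shift (c : List Int) (a : Int) :
    c.foldl (fun acc x => if x ≥ 10000 then acc + 1 else acc) a
      = a + (c.countP (fun x => decide (x ≥ 10000)) : Int) := by
  induction c generalizing a with
  | nil => simp
  | cons x c ih =>
    simp only [List.foldl_cons, List.countP_cons, ih]
    by_cases h : x ≥ 10000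
    · rw [if_pos h, if_pos (by simpa using h)]
      push_cast
      omega
    · rw [if_neg h, if_neg (by simpa using h)]
      omega

-- on a descending list, B's prefix scan counts exactly the elements ≥ 10000
theorem pvOverPrefix_eq_countP (l : List Int) (hs : l.Pairwise (fun a b => b ≤ a)) :
    pvOverPrefix l = (l.countP (fun x => decide (x ≥ 10000)) : Int) := by
  induction l with
  | nil => simp [pvOverPrefix]
  | cons s t ih =>
    rw [List.pairwise_cons] at hs
    simp only [pvOverPrefix, List.countP_cons]
    by_cases h : s < 10000
    · have hz : t.countP (fun x => decide (x ≥ 10000)) = 0 := by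
        rw [List.countP_eq_zero]
        intro y hy
        have hys := hs.1 y hy
        simp only [ge_iff_le, decide_eq_true_eq, not_le]
        omega
      have hp : (decide (s ≥ 10000)) = false := by
        simp only [ge_iff_le, decide_eq_false_iff_not, not_le]
        omega
      rw [if_pos h, hz, hp]
      simp
    · have hp : (decide (s ≥ 10000)) = true := by
        simp only [ge_iff_le, decide_eq_true_eq]
        omega
      rw [if_neg h, ih hs.2, hp]
      simp only [if_true]
      push_cast
      omega

-- head of the descending sort = the running max A computes
theorem pvHead_sorted_eq_max (d0 : Int) (rest : List Int) :
    PySem.List.pyGetD (PySem.List.sorted (d0 :: rest) (fun x => x) true) 0 0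
      = rest.foldl max d0 := by
  have hne : PySem.List.sorted (d0 :: rest) (fun x => x) true ≠ [] := by
    rw [Ne, PySem.List.sorted_eq_nil_iff]; simp
  obtain ⟨m, t, hmt⟩ : ∃ m t, PySem.List.sorted (d0 :: rest) (fun x => x) true = m :: t := by
    cases h : PySem.List.sorted (d0 :: rest) (fun x => x) true with
    | nil => exact absurd h hne
    | cons m t => exact ⟨m, t, rfl⟩
  rw [hmt, PySem.List.pyGetD_zero_cons]
  have hge : ∀ y ∈ (d0 :: rest), y ≤ m := PySem.List.key_head_sorted_rev_ge _ (fun x => x) hmt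
  have hmem : m ∈ (d0 :: rest) := by
    have : m ∈ PySem.List.sorted (d0 :: rest) (fun x => x) true := by rw [hmt]; exact List.mem_cons_self
    exact (PySem.List.mem_sorted _ _ _ _).mp this
  have hF := PySem.List.le_foldl_max rest d0
  have hFm : rest.foldl max d0 ≤ m := by
    rcases PySem.List.foldl_max_mem rest d0 with h | h
    · rw [h]; exact hge d0 List.mem_cons_self
    · exact hge _ (List.mem_cons_of_mem _ h)
  have hmF : m ≤ rest.foldl max d0 := by
    rcases List.mem_cons.mp hmem with h | h
    · rw [h]; exact hF.1
    · exact hF.2 m h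
  omega

-- ===== VERDICT =====
theorem weekly_steps_py_spec : Claim_equal_weekly_steps_py := by
  intro days _ hpre
  unfold Spec_weekly_steps_py
  obtain ⟨hne, -⟩ := hpre
  obtain ⟨d, rest, rfl⟩ : ∃ d rest, days = d :: rest := by
    cases days with
    | nil => exact absurd rfl hne
    | cons d rest => exact ⟨d, rest, rfl⟩
  have hperm : (PySem.List.sorted ((d :: rest).map pvSteps) (fun x => x) true).Perm
      ((d :: rest).map pvSteps) := PySem.List.sorted_perm _ _ _
  have hsum := hperm.sum_eq
  have hcnt := hperm.countP_eq (fun x => decide (x ≥ 10000))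
  simp only [weekly_steps_py, weekly_steps_py_alt]
  rw [pvCountA_shift,
      pvOverPrefix_eq_countP _ (PySem.List.sorted_pairwise_rev _ _),
      hsum, hcnt]
  rw [show (d :: rest).map pvSteps = pvSteps d :: rest.map pvSteps from rfl,
      PySem.List.max?_id_cons, pvHead_sorted_eq_max]
  simp
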